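-- pv_equiv track=rewrite | github.com/aendrash/mock_excel_interviewer_streamlit | backend/interview_logic.py | parse_question_answer
-- ===== SOURCE A (Python) =====
-- def parse_question_answer(text):
--     lines = text.split("\n")
--     question = ""
--     answer = ""
--     reading_question = False
--     reading_answer = False
--     for line in lines:
--         line = line.strip()
--         if line.lower().startswith("question:"):
--             question = line[len("question:"):].strip()
--             reading_question = True
--             reading_answer = False
--         elif line.lower().startswith("answer:"):
--             answer = line[len("answer:"):].strip()
--             reading_question = False
--             reading_answer = True
--         else:
--             if reading_question:
--                 question += " " + line
--             elif reading_answer: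
--                 answer += " " + line
--     return question.strip(), answer.strip()
-- ===== SOURCE B (Python) =====
-- def parse_question_answer(text):
--     # Phase 1: group the lines into labeled segments (newest segment first).
--     segments = []
--     for raw in text.split("\n"):
--         line = raw.strip()
--         low = line.lower()
--         if low.startswith("question:"):
--             segments.insert(0, (True, [line[len("question:"):].strip()]))
--         elif low.startswith("answer:"):
--             segments.insert(0, (False, [line[len("answer:"):].strip()]))
--         elif segments:
--             segments[0][1].append(line)
--     # Phase 2: the first segment of each kind (= last labeled in the text) wins.
--     def render(kind):
--         for k, toks in segments:
--             if k == kind: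
--                 return " ".join(toks).strip()
--         return ""
--     return render(True), render(False)
-- ===== Notes on version B (the rewrite author's own statement) =====
-- stated objective: simpler
-- what changed: A threads four mutable variables (two accumulating strings and two reading flags) through one loop; B decomposes the task into two phases: group the lines into labeled segments (label content plus continuation tokens), then render the last segment of each kind by space-joining its tokens and stripping.
import Mathlib
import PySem

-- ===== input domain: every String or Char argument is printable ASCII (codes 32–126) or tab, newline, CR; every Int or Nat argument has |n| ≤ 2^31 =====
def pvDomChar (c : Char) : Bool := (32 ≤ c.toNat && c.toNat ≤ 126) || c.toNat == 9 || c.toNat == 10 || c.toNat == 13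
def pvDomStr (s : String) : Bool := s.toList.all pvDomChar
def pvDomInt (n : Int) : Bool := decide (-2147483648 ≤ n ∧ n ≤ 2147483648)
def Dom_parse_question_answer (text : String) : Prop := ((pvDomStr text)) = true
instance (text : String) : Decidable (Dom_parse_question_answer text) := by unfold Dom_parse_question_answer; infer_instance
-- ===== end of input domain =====

-- B replaces A's four mutable state variables by a two-phase decomposition: group the
-- lines into labeled segments, then render the last segment of each kind (objective: simpler).

-- ===== PORT A =====
-- loop body of A: state = ((question, answer), (reading_question, reading_answer))
def pqaStepA (st : (String × String) × Bool × Bool) (line0 : String) :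
    (String × String) × Bool × Bool :=
  let line := PySem.Str.strip line0
  if PySem.Str.startswith (PySem.Str.lower line) "question:" then
    ((PySem.Str.strip (PySem.Str.slice line (some 9) none), st.1.2), (true, false))
  else if PySem.Str.startswith (PySem.Str.lower line) "answer:" then
    ((st.1.1, PySem.Str.strip (PySem.Str.slice line (some 7) none)), (false, true))
  else if st.2.1 then ((st.1.1 ++ " " ++ line, st.1.2), st.2)
  else if st.2.2 then ((st.1.1, st.1.2 ++ " " ++ line), st.2)
  else st

def parse_question_answer (text : String) : String × String :=
  let lines := (PySem.Str.split? text "\n").getD []  -- sep "\n" ≠ "", so split? is always `some`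
  let st := lines.foldl pqaStepA (("", ""), (false, false))
  (PySem.Str.strip st.1.1, PySem.Str.strip st.1.2)

-- ===== PORT B =====
-- phase 1 step: Source B keeps the newest segment at position 0 (segments.insert(0, …)),
-- so the Lean list has the newest segment at the head; a continuation line extends it.
def pqaStepB (segs : List (Bool × List String)) (raw : String) : List (Bool × List String) :=
  let line := PySem.Str.strip raw
  let low := PySem.Str.lower line
  if PySem.Str.startswith low "question:" then
    (true, [PySem.Str.strip (PySem.Str.slice line (some 9) none)]) :: segs
  else if PySem.Str.startswith low "answer:" then
    (false, [PySem.Str.strip (PySem.Str.slice line (some 7) none)]) :: segs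
  else
    match segs with
    | [] => []
    | (k, toks) :: rest => (k, toks ++ [line]) :: rest

-- phase 2: first segment of the given kind (= last labeled in the text), rendered
def pqaRender (b : Bool) : List (Bool × List String) → String
  | [] => ""
  | (k, toks) :: rest =>
      if k == b then PySem.Str.strip (PySem.Str.join " " toks) else pqaRender b rest

def parse_question_answer_alt (text : String) : String × String :=
  let segs := ((PySem.Str.split? text "\n").getD []).foldl pqaStepB []
  (pqaRender true segs, pqaRender false segs)

-- ===== PRECONDITION & SPEC =====
def Spec_parse_question_answer (text : String) (out : String × String) : Prop := out = parse_question_answer_alt text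
instance (text : String) (out : String × String) : Decidable (Spec_parse_question_answer text out) := by unfold Spec_parse_question_answer; infer_instance

-- ===== CLAIM (what is proved, stated in full; the proofs are below) =====
def Claim_equal_parse_question_answer : Prop := ∀ (text : String), Dom_parse_question_answer text → Spec_parse_question_answer text (parse_question_answer text)

-- ===== LEMMAS AND PROOFS =====

-- rendering of a segment list without the final strip (A's running accumulator value)
def pqaRaw (b : Bool) : List (Bool × List String) → String
  | [] => ""
  | (k, toks) :: rest => if k == b then PySem.Str.join " " toks else pqaRaw b rest

-- which kind of segment is currently open (A's reading_* flags)
def pqaHead (b : Bool) : List (Bool × List String) → Bool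
  | [] => false
  | (k, _) :: _ => k == b

-- the invariant tying A's loop state to B's segment list
def pqaInv (st : (String × String) × Bool × Bool) (segs : List (Bool × List String)) : Prop :=
  st.1.1 = pqaRaw true segs ∧ st.1.2 = pqaRaw false segs ∧
  st.2.1 = pqaHead true segs ∧ st.2.2 = pqaHead false segs ∧
  ∀ s ∈ segs, s.2 ≠ ([] : List String)

theorem pqa_join_snoc_chars (sep : List Char) (ts : List (List Char)) (t : List Char) (h : ts ≠ []) :
    PySem.Chars.join sep (ts ++ [t]) = PySem.Chars.join sep ts ++ sep ++ t := by
  induction ts with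
  | nil => simp at h
  | cons x xs ih =>
    cases xs with
    | nil => simp [PySem.Chars.join_cons_cons, PySem.Chars.join_singleton]
    | cons y ys =>
      have hx : x :: (y :: ys) ++ [t] = x :: (y :: (ys ++ [t])) := by simp
      rw [hx, PySem.Chars.join_cons_cons]
      have hy : y :: (ys ++ [t]) = (y :: ys) ++ [t] := by simp
      rw [hy, ih (by simp), PySem.Chars.join_cons_cons]
      simp

theorem pqa_join_snoc (toks : List String) (t : String) (h : toks ≠ []) :
    PySem.Str.join " " (toks ++ [t]) = PySem.Str.join " " toks ++ " " ++ t := by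
  apply String.ext
  simp only [PySem.Str.toList_join, String.toList_append, List.map_append, List.map]
  rw [pqa_join_snoc_chars _ _ _ (by simpa using h)]

theorem pqa_join_single (t : String) : PySem.Str.join " " [t] = t := by
  apply String.ext
  simp only [PySem.Str.toList_join, List.map, PySem.Chars.join_singleton]

theorem pqa_step_inv (st : (String × String) × Bool × Bool) (segs : List (Bool × List String))
    (l : String) (h : pqaInv st segs) : pqaInv (pqaStepA st l) (pqaStepB segs l) := by
  obtain ⟨h1, h2, h3, h4, h5⟩ := h
  simp only [pqaStepA, pqaStepB]
  by_cases hq : PySem.Chars.startswith (PySem.Chars.lower (PySem.Chars.strip l.toList))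
      ['q', 'u', 'e', 's', 't', 'i', 'o', 'n', ':'] = true
  · simp [hq, pqaInv, pqaRaw, pqaHead, h2, pqa_join_single]
    exact ⟨fun b hb => h5 (false,b) hb, fun b hb => h5 (true,b) hb⟩
  · by_cases ha : PySem.Chars.startswith (PySem.Chars.lower (PySem.Chars.strip l.toList))
        ['a', 'n', 's', 'w', 'e', 'r', ':'] = true
    · simp [hq, ha, pqaInv, pqaRaw, pqaHead, h1, pqa_join_single]
      exact ⟨fun b hb => h5 (false,b) hb, fun b hb => h5 (true,b) hb⟩
    · match segs with
      | [] =>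
        simp only [pqaHead] at h3 h4
        simp [hq, ha, h3, h4, pqaInv, pqaRaw, pqaHead, h1, h2]
      | (k, toks) :: rest =>
        have htoks : toks ≠ [] := h5 (k, toks) (by simp)
        have hj := pqa_join_snoc toks (PySem.Str.strip l) htoks
        have h5' : ∀ s ∈ (k, toks ++ [PySem.Str.strip l]) :: rest, s.2 ≠ ([] : List String) := by
          intro s hs
          rcases List.mem_cons.mp hs with hs | hs
          · subst hs; simp
          · exact h5 s (by simp [hs])
        cases k with
        | true =>
          have h3' : st.2.1 = true := by simpa [pqaHead] using h3
          have h4' : st.2.2 = false := by simpa [pqaHead] using h4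
          have h1' : st.1.1 = PySem.Str.join " " toks := by simpa [pqaRaw] using h1
          have h2' : st.1.2 = pqaRaw false rest := by simpa [pqaRaw] using h2
          simp [hq, ha, h3', h4', pqaInv, pqaRaw, pqaHead, h1', h2', hj, htoks]
          exact ⟨fun b hb => h5 (false,b) (List.mem_cons_of_mem _ hb),
                 fun b hb => h5 (true,b) (List.mem_cons_of_mem _ hb)⟩
        | false =>
          have h3' : st.2.1 = false := by simpa [pqaHead] using h3
          have h4' : st.2.2 = true := by simpa [pqaHead] using h4
          have h1' : st.1.1 = pqaRaw true rest := by simpa [pqaRaw] using h1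
          have h2' : st.1.2 = PySem.Str.join " " toks := by simpa [pqaRaw] using h2
          simp [hq, ha, h3', h4', pqaInv, pqaRaw, pqaHead, h1', h2', hj, htoks]
          exact ⟨fun b hb => h5 (false,b) (List.mem_cons_of_mem _ hb),
                 fun b hb => h5 (true,b) (List.mem_cons_of_mem _ hb)⟩

theorem pqa_fold_inv (lines : List String) (st : (String × String) × Bool × Bool)
    (segs : List (Bool × List String)) (h : pqaInv st segs) :
    pqaInv (lines.foldl pqaStepA st) (lines.foldl pqaStepB segs) := by
  induction lines generalizing st segs with
  | nil => exact h
  | cons l ls ih =>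
    rw [List.foldl_cons, List.foldl_cons]
    exact ih _ _ (pqa_step_inv st segs l h)

theorem pqa_render_eq (b : Bool) (segs : List (Bool × List String)) :
    pqaRender b segs = PySem.Str.strip (pqaRaw b segs) := by
  induction segs with
  | nil =>
    simp only [pqaRender, pqaRaw]
    apply String.ext
    simp [pysem, PySem.Chars.strip, PySem.Chars.lstrip, PySem.Chars.rstrip]
  | cons s rest ih =>
    obtain ⟨k, toks⟩ := s
    by_cases hk : (k == b) = true
    · simp [pqaRender, pqaRaw, hk]
    · simp [pqaRender, pqaRaw, hk, ih]

-- ===== VERDICT (by name: the statement is the Claim_ definition above) =====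
theorem parse_question_answer_spec : Claim_equal_parse_question_answer := by
  intro text _
  unfold Spec_parse_question_answer parse_question_answer parse_question_answer_alt
  have h0 : pqaInv (("", ""), (false, false)) [] := by
    refine ⟨rfl, rfl, rfl, rfl, by simp⟩
  have h := pqa_fold_inv ((PySem.Str.split? text "\n").getD []) (("", ""), (false, false)) [] h0
  obtain ⟨h1, h2, _, _, _⟩ := h
  simp only [h1, h2, pqa_render_eq]
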